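-- pv_equiv track=rewrite | github.com/khan-ashifur/listory-optimized | backend/apps/listings/quality_validator.py | _has_natural_keyword_integration
-- ===== SOURCE A (Python) =====
-- def _has_natural_keyword_integration(text: str) -> bool:
--     """Check if keywords are naturally integrated vs stuffed."""
--     # Simple heuristic: check for repeated phrases that might indicate keyword stuffing
--     words = text.lower().split()
--     word_counts = {}
--     for word in words:
--         if len(word) > 3:  # Only check meaningful words
--             word_counts[word] = word_counts.get(word, 0) + 1
--
--     # If any word appears more than 3 times in a title, it might be stuffed
--     max_count = max(word_counts.values()) if word_counts else 0
--     return max_count <= 3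
-- ===== SOURCE B (Python) =====
-- def _has_natural_keyword_integration(text: str) -> bool:
--     """Check if keywords are naturally integrated vs stuffed."""
--     # Sort the meaningful words and scan consecutive equal runs:
--     # the longest run is the highest frequency of any meaningful word.
--     words = sorted(w for w in text.lower().split() if len(w) > 3)
--     prev = None
--     run = 0
--     best = 0
--     for w in words:
--         run = run + 1 if w == prev else 1
--         prev = w
--         best = max(best, run)
--     return best <= 3
-- ===== Notes on version B (the rewrite author's own statement) =====
-- stated objective: alternative
-- what changed: Replaces the dict-based word-frequency count and max over its values with a sort of the filtered words followed by a single scan of consecutive equal runs tracking the longest run.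
import Mathlib
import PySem

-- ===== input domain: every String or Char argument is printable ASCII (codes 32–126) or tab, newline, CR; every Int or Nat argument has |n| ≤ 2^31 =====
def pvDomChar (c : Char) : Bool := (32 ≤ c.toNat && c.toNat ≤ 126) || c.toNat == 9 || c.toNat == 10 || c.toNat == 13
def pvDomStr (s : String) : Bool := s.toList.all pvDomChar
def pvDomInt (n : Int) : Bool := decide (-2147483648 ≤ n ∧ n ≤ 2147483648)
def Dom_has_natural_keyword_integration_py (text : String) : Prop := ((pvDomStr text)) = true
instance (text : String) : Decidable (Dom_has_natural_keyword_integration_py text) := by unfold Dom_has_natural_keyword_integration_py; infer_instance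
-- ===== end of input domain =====

-- B replaces A's dict-frequency counting (max over counter values) with sorting the
-- meaningful words and scanning consecutive equal runs, tracking the longest run
-- (objective: alternative; same return value, not faster).

-- ===== PORT A =====
def has_natural_keyword_integration_py (text : String) : Bool :=
  -- words = text.lower().split(); word_counts = the counting loop;
  -- max_count = max(word_counts.values()) if word_counts else 0 (max? is none exactly when the dict is empty)
  decide ((match PySem.List.max?
      (((PySem.Str.split₀ (PySem.Str.lower text)).foldl
        (fun d w => if PySem.Str.len w > 3 then d.insert w (d.getD w 0 + 1) else d)
        (PySem.Dict.empty : PySem.Dict String Int)).values) (fun v => v) with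
    | some m => m
    | none => 0) ≤ 3)

-- ===== PORT B =====
-- loop body of Source B's for-loop: state (prev, run, best)
def kwStep (s : Option String × Int × Int) (w : String) : Option String × Int × Int :=
  let run := if s.1 = some w then s.2.1 + 1 else 1
  (some w, run, max s.2.2 run)

def has_natural_keyword_integration_py_alt (text : String) : Bool :=
  -- words = sorted(filtered words); the for-loop is the fold of kwStep over (prev, run, best)
  decide (((PySem.List.sorted
      ((PySem.Str.split₀ (PySem.Str.lower text)).filter (fun w => decide (PySem.Str.len w > 3)))
      (fun w => w) false).foldl kwStep (none, 0, 0)).2.2 ≤ 3)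

-- ===== PRECONDITION & SPEC =====
def Spec_has_natural_keyword_integration_py (text : String) (out : Bool) : Prop := out = has_natural_keyword_integration_py_alt text
instance (text : String) (out : Bool) : Decidable (Spec_has_natural_keyword_integration_py text out) := by unfold Spec_has_natural_keyword_integration_py; infer_instance

-- ===== CLAIM (what is proved, stated in full; the proofs are below) =====
def Claim_equal_has_natural_keyword_integration_py : Prop := ∀ (text : String), Dom_has_natural_keyword_integration_py text → Spec_has_natural_keyword_integration_py text (has_natural_keyword_integration_py text)

-- ===== LEMMAS AND PROOFS =====

-- the meaningful words, shared characterisation target of both ports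
def kwWords (text : String) : List String :=
  (PySem.Str.split₀ (PySem.Str.lower text)).filter (fun w => decide (PySem.Str.len w > 3))

-- a guarded fold is the fold over the filtered list
lemma foldl_if_eq_foldl_filter {α β : Type} (p : α → Prop) [DecidablePred p] (f : β → α → β) :
    ∀ (xs : List α) (d : β),
      xs.foldl (fun d w => if p w then f d w else d) d
        = (xs.filter (fun w => decide (p w))).foldl f d := by
  intro xs
  induction xs with
  | nil => intro d; rfl
  | cons x t ih => intro d; by_cases h : p x <;> simp [h, ih]

lemma A_iff (text : String) :
    has_natural_keyword_integration_py text = true ↔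
      ∀ w : String, ((kwWords text).count w : Int) ≤ 3 := by
  unfold has_natural_keyword_integration_py kwWords
  rw [foldl_if_eq_foldl_filter (β := PySem.Dict String Int) (fun w : String => PySem.Str.len w > 3)
        (fun d w => d.insert w (d.getD w 0 + 1)) (PySem.Str.split₀ (PySem.Str.lower text))
        PySem.Dict.empty,
      PySem.Dict.foldl_insert_getD_add_one_eq_counter]
  set L := (PySem.Str.split₀ (PySem.Str.lower text)).filter
      (fun w => decide (PySem.Str.len w > 3)) with hL
  have hvals : (PySem.Dict.counter L).values
      = (PySem.Set.ofList L).map (fun k => ((L.count k : Int))) := by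
    show ((PySem.Dict.counter L).items.map (·.2)) = _
    rw [PySem.Dict.items_counter, List.map_map]
    rfl
  rw [hvals]
  cases hmax : PySem.List.max?
      ((PySem.Set.ofList L).map (fun k => ((L.count k : Int)))) (fun v => v) with
  | none =>
    rw [PySem.List.max?_eq_none_iff] at hmax
    simp only [List.map_eq_nil_iff] at hmax
    constructor
    · intro _ w
      have hnm : w ∉ L := by
        intro hw
        rw [← PySem.Set.mem_ofList] at hw
        simp [hmax] at hw
      simp [List.count_eq_zero.mpr hnm]
    · intro _; decide
  | some m =>
    have hmem := PySem.List.max?_mem hmax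
    have hismax := PySem.List.max?_isMax hmax
    simp only [decide_eq_true_eq]
    constructor
    · intro hm w
      by_cases hw : w ∈ L
      · have hin : ((L.count w : Int)) ∈ (PySem.Set.ofList L).map
            (fun k => ((L.count k : Int))) :=
          List.mem_map_of_mem ((PySem.Set.mem_ofList _ _).mpr hw)
        exact le_trans (hismax _ hin) hm
      · simp [List.count_eq_zero.mpr hw]
    · intro hall
      obtain ⟨k, _, hk⟩ := List.mem_map.mp hmem
      exact hk ▸ hall k

-- run-scan invariant on a sorted (Pairwise ≤) list: the final best is ≤ 3 iff the
-- pending run plus the remaining copies of prev, and every other count, are ≤ 3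
lemma scan_le_iff :
    ∀ (l : List String) (p : String) (r b : Int), l.Pairwise (· ≤ ·) →
      (∀ x ∈ l, p ≤ x) → r ≤ b →
      ((l.foldl kwStep (some p, r, b)).2.2 ≤ 3 ↔
        b ≤ 3 ∧ r + (l.count p : Int) ≤ 3 ∧ ∀ w, w ≠ p → ((l.count w : Int) ≤ 3)) := by
  intro l
  induction l with
  | nil =>
    intro p r b _ _ hrb
    simp only [List.foldl_nil, List.count_nil]
    constructor
    · intro h; exact ⟨h, by omega, fun w _ => by simp⟩
    · rintro ⟨h, _, _⟩; exact h
  | cons w t ih =>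
    intro p r b hs hp hrb
    have hpw : p ≤ w := hp w (List.mem_cons_self ..)
    have hts : t.Pairwise (· ≤ ·) := (List.pairwise_cons.mp hs).2
    have htw : ∀ x ∈ t, w ≤ x := (List.pairwise_cons.mp hs).1
    by_cases hew : p = w
    · subst hew
      have hstep : kwStep (some p, r, b) p = (some p, r + 1, max b (r + 1)) := by
        simp [kwStep]
      rw [List.foldl_cons, hstep,
          ih p (r + 1) (max b (r + 1)) hts (fun x hx => hp x (List.mem_cons_of_mem _ hx))
            (le_max_right _ _)]
      rw [max_le_iff]
      constructor
      · rintro ⟨⟨h1, h2⟩, h3, h4⟩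
        refine ⟨h1, by simp only [List.count_cons_self]; push_cast; omega,
          fun w' hw' => ?_⟩
        have h5 := h4 w' hw'
        simp only [List.count_cons, beq_iff_eq, if_neg (Ne.symm hw')]
        simpa using h5
      · rintro ⟨h1, h2, h3⟩
        rw [List.count_cons_self] at h2
        push_cast at h2
        refine ⟨⟨h1, by omega⟩, by omega, fun w' hw' => ?_⟩
        have h5 := h3 w' hw'
        simp only [List.count_cons, beq_iff_eq, if_neg (Ne.symm hw')] at h5
        simpa using h5
    · have hltw : p < w := lt_of_le_of_ne hpw hew
      have hpt : p ∉ t := fun hx => absurd (htw p hx) (not_le.mpr hltw)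
      have hcp : (w :: t).count p = 0 := by
        rw [List.count_eq_zero]
        intro hx
        rcases List.mem_cons.mp hx with h | h
        · exact hew h
        · exact hpt h
      have hstep : kwStep (some p, r, b) w = (some w, 1, max b 1) := by
        simp only [kwStep, Option.some.injEq, if_neg hew]
      rw [List.foldl_cons, hstep, ih w 1 (max b 1) hts htw (le_max_right _ _), max_le_iff]
      constructor
      · rintro ⟨⟨h1, _⟩, h2, h3⟩
        refine ⟨h1, by rw [hcp]; push_cast; omega, fun w' hw' => ?_⟩
        by_cases hww : w' = w
        · subst hww
          rw [List.count_cons_self]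
          push_cast
          omega
        · have h5 := h3 w' hww
          simp only [List.count_cons, beq_iff_eq, if_neg (Ne.symm hww)]
          simpa using h5
      · rintro ⟨h1, _, h3⟩
        have hww : (w : String) ≠ p := fun h => hew h.symm
        have h4 := h3 w hww
        rw [List.count_cons_self] at h4
        push_cast at h4
        refine ⟨⟨h1, by omega⟩, by omega, fun w' hw' => ?_⟩
        by_cases hwp : w' = p
        · subst hwp
          rw [List.count_eq_zero.mpr hpt]
          simp
        · have h5 := h3 w' hwp
          simp only [List.count_cons, beq_iff_eq, if_neg (Ne.symm hw')] at h5
          simpa using h5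

lemma B_iff (text : String) :
    has_natural_keyword_integration_py_alt text = true ↔
      ∀ w : String, ((kwWords text).count w : Int) ≤ 3 := by
  unfold has_natural_keyword_integration_py_alt kwWords
  set L := (PySem.Str.split₀ (PySem.Str.lower text)).filter
      (fun w => decide (PySem.Str.len w > 3)) with hL
  set S := PySem.List.sorted L (fun w => w) false with hS
  simp only [decide_eq_true_eq]
  have hperm : S.Perm L := PySem.List.sorted_perm _ _ _
  have hcnt : ∀ w, S.count w = L.count w := fun w => hperm.count_eq w
  have hpw : S.Pairwise (· ≤ ·) := PySem.List.sorted_pairwise L (fun w => w)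
  clear_value S
  cases S with
  | nil =>
    simp only [List.foldl_nil]
    constructor
    · intro _ w
      have h0 := hcnt w
      simp only [List.count_nil] at h0
      simp [← h0]
    · intro _; norm_num
  | cons w t =>
    have hstep : kwStep (none, 0, 0) w = (some w, 1, max 0 1) := by simp [kwStep]
    rw [List.foldl_cons, hstep]
    rw [scan_le_iff t w 1 (max 0 1) (List.pairwise_cons.mp hpw).2 (List.pairwise_cons.mp hpw).1
          (le_max_right _ _)]
    constructor
    · rintro ⟨_, h2, h3⟩ w'
      rw [← hcnt w']
      by_cases hww : w' = w
      · subst hww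
        rw [List.count_cons_self]
        push_cast
        omega
      · have h5 := h3 w' hww
        simp only [List.count_cons, beq_iff_eq, if_neg (Ne.symm hww)]
        simpa using h5
    · intro hall
      have h1 := hall w
      rw [← hcnt w, List.count_cons_self] at h1
      push_cast at h1
      refine ⟨by norm_num, by omega, fun w' hw' => ?_⟩
      have h5 := hall w'
      rw [← hcnt w'] at h5
      simp only [List.count_cons, beq_iff_eq, if_neg (Ne.symm hw')] at h5
      simpa using h5

-- ===== VERDICT (by name: the statement is the Claim_ definition above) =====
theorem has_natural_keyword_integration_py_spec : Claim_equal_has_natural_keyword_integration_py := by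
  intro text _
  unfold Spec_has_natural_keyword_integration_py
  rw [Bool.eq_iff_iff, A_iff, B_iff]
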